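-- pv_equiv track=rewrite | github.com/zeinab29/Encrption_using_play_fair | OurEncryption.py | prepare_text_decryption
-- ===== SOURCE A (Python) =====
-- def delete_char(word,idx):
--     new_str =""
--     for i in range(len(word)):
--         if i != idx:
--             new_str = new_str + word[i]
--     return new_str
--
-- def prepare_text_decryption(cipherText):
--     i = 0
--     while i < len(cipherText):
--         if i!= 0 and i != len(cipherText)-1 and cipherText[i] == 'X':
--             if cipherText[i-1] == cipherText[i+1]:
--                 cipherText = delete_char(cipherText,i)
--
--         if i ==len(cipherText)-1 and cipherText[i] == 'Z':
--             cipherText = delete_char(cipherText,i)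
--         i+=1
--     return cipherText
-- ===== SOURCE B (Python) =====
-- def prepare_text_decryption(cipherText):
--     out = []
--     n = len(cipherText)
--     j = 0
--     while j < n:
--         c = cipherText[j]
--         if out and j < n - 1 and c == 'X' and out[-1] == cipherText[j + 1]:
--             # filler X between equal chars: drop it; the following char is taken
--             # verbatim (it was never re-examined), unless it is a trailing 'Z'
--             nxt = cipherText[j + 1]
--             if not (j + 1 == n - 1 and nxt == 'Z'):
--                 out.append(nxt)
--             j += 2
--         else:
--             if not (j == n - 1 and c == 'Z'):
--                 out.append(c)
--             j += 1
--     return ''.join(out)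
-- ===== Notes on version B (the rewrite author's own statement) =====
-- stated objective: alternative
-- what changed: A repeatedly mutates the string inside a while loop, rebuilding the whole string with delete_char on every deletion (quadratic in the number of deletions); B makes a single left-to-right pass over the fixed input, appending kept characters to an output list, consuming the character after a deleted filler X verbatim and dropping a trailing Z.
import Mathlib
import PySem

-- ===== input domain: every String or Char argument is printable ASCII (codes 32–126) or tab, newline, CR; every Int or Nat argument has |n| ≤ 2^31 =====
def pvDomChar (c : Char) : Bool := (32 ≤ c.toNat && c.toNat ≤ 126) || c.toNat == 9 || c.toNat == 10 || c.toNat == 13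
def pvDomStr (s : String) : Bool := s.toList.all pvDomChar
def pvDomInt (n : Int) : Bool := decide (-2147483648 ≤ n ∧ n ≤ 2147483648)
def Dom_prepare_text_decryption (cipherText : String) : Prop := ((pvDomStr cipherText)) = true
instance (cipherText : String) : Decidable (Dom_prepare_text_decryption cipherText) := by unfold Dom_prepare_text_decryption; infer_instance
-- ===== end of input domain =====

-- B replaces A's delete-and-rescan while-loop (which rebuilds the string on every
-- deletion) by one left-to-right pass building the output list; objective: alternative.

-- ===== PORT A =====

-- helper 'delete_char': rebuilds the string character by character, skipping index idx
-- (indices produced by range(len(word)) are in range, so List.getD is exact for word[i])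
def delete_char (word : List Char) (idx : Int) : List Char :=
  (List.range word.length).foldl
    (fun acc (i : Nat) => if (i : Int) != idx then acc ++ [word.getD i ' '] else acc) []

-- termination helpers for the while loop below (cited by pv_aLoop's decreasing_by)
theorem delete_char_length_le (word : List Char) (idx : Int) :
    (delete_char word idx).length ≤ word.length := by
  unfold delete_char
  rw [PySem.List.foldl_append_if (fun (i : Nat) => (i : Int) != idx)
        (fun (i : Nat) => word.getD i ' ') (List.range word.length) []]
  simpa using le_trans (List.length_filter_le _ _) (le_of_eq (List.length_range))

theorem ite_delete_length_le (c : Prop) [Decidable c] (t : List Char) (k : Int) :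
    (if c then delete_char t k else t).length ≤ t.length := by
  split
  · exact delete_char_length_le t k
  · exact le_rfl

-- second statement of A's loop body: the trailing-'Z' deletion
def pv_aStepZ (s1 : List Char) (i : Nat) : List Char :=
  if i = s1.length - 1 ∧ s1.getD i ' ' = 'Z' then delete_char s1 (i : Int) else s1

-- first statement of A's loop body: the filler-'X' deletion, then the 'Z' one
def pv_aStep (s : List Char) (i : Nat) : List Char :=
  pv_aStepZ (if i ≠ 0 ∧ i ≠ s.length - 1 ∧ s.getD i ' ' = 'X' ∧
                s.getD (i - 1) ' ' = s.getD (i + 1) ' '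
             then delete_char s (i : Int) else s) i

theorem pv_aStep_length_le (s : List Char) (i : Nat) :
    (pv_aStep s i).length ≤ s.length := by
  unfold pv_aStep pv_aStepZ
  exact le_trans (ite_delete_length_le _ _ _) (ite_delete_length_le _ _ _)

-- the while loop of A: state = (current string, index i)
def pv_aLoop (s : List Char) (i : Nat) : List Char :=
  if _h : i < s.length then pv_aLoop (pv_aStep s i) (i + 1)
  else s
termination_by s.length - i
decreasing_by
  have := pv_aStep_length_le s i
  omega

def prepare_text_decryption (cipherText : String) : String :=
  String.ofList (pv_aLoop cipherText.toList 0)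

-- ===== PORT B =====

-- single pass over the fixed input ct; out = kept prefix, j = current index
def pv_bLoop (ct : List Char) (out : List Char) (j : Nat) : List Char :=
  if _h : j < ct.length then
    if out ≠ [] ∧ j < ct.length - 1 ∧ ct.getD j ' ' = 'X' ∧
       PySem.List.pyGetD out (-1) ' ' = ct.getD (j + 1) ' ' then
      if ¬ (j + 1 = ct.length - 1 ∧ ct.getD (j + 1) ' ' = 'Z') then
        pv_bLoop ct (out ++ [ct.getD (j + 1) ' ']) (j + 2)
      else pv_bLoop ct out (j + 2)
    else
      if ¬ (j = ct.length - 1 ∧ ct.getD j ' ' = 'Z') then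
        pv_bLoop ct (out ++ [ct.getD j ' ']) (j + 1)
      else pv_bLoop ct out (j + 1)
  else out
termination_by ct.length - j

def prepare_text_decryption_alt (cipherText : String) : String :=
  String.ofList (pv_bLoop cipherText.toList [] 0)

-- ===== PRECONDITION & SPEC =====
def Spec_prepare_text_decryption (cipherText : String) (out : String) : Prop := out = prepare_text_decryption_alt cipherText
instance (cipherText : String) (out : String) : Decidable (Spec_prepare_text_decryption cipherText out) := by unfold Spec_prepare_text_decryption; infer_instance

-- ===== CLAIM (what is proved, stated in full; the proofs are below) =====
def Claim_equal_prepare_text_decryption : Prop := ∀ (cipherText : String), Dom_prepare_text_decryption cipherText → Spec_prepare_text_decryption cipherText (prepare_text_decryption cipherText)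

-- ===== LEMMAS AND PROOFS =====

-- (range n).map (w.getD (j+·) d) reconstructs w.drop j
theorem map_getD_range_eq_drop (w : List Char) (j : Nat) (d : Char) :
    (List.range (w.length - j)).map (fun k => w.getD (j + k) d) = w.drop j := by
  apply List.ext_getElem
  · simp
  · intro n h1 h2
    simp only [List.getElem_map, List.getElem_range, List.getElem_drop]
    rw [List.getD_eq_getElem?_getD, List.getElem?_eq_getElem (by simp at h1 ⊢; omega)]
    rfl

-- characterization of A's helper at an in-range index
theorem delete_char_eq (w : List Char) (i : Nat) (hi : i < w.length) :
    delete_char w (i : Int) = w.take i ++ w.drop (i + 1) := by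
  unfold delete_char
  rw [PySem.List.foldl_append_if (fun (k : Nat) => (k : Int) != (i : Int))
        (fun (k : Nat) => w.getD k ' ') (List.range w.length) []]
  have hsplit : List.range w.length =
      List.range i ++ List.map (fun x => i + x) (List.range (w.length - i)) := by
    rw [← List.range_add]; congr 1; omega
  rw [hsplit, List.filter_append]
  have hlo : List.filter (fun (k : Nat) => (k : Int) != (i : Int)) (List.range i)
      = List.range i := by
    apply List.filter_eq_self.2
    intro a ha
    simp only [List.mem_range] at ha
    simp only [bne_iff_ne, ne_eq, Int.natCast_inj]
    omega
  have hn : w.length - i = 1 + (w.length - (i + 1)) := by omega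
  have hhi : List.filter (fun (k : Nat) => (k : Int) != (i : Int))
      (List.map (fun x => i + x) (List.range (w.length - i)))
      = List.map (fun x => (i + 1) + x) (List.range (w.length - (i + 1))) := by
    rw [hn, List.range_add, List.map_append, List.filter_append]
    have h00 : List.map (fun x => i + x) (List.range 1) = [i] := by simp
    rw [h00]
    have h0 : List.filter (fun (k : Nat) => (k : Int) != (i : Int)) [i] = [] := by simp
    rw [h0, List.nil_append, List.map_map]
    have h1 : List.filter (fun (k : Nat) => (k : Int) != (i : Int))
        (List.map ((fun x => i + x) ∘ fun x => 1 + x) (List.range (w.length - (i + 1))))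
        = List.map ((fun x => i + x) ∘ fun x => 1 + x) (List.range (w.length - (i + 1))) := by
      apply List.filter_eq_self.2
      intro a ha
      simp only [List.mem_map, Function.comp] at ha
      obtain ⟨x, _, rfl⟩ := ha
      simp only [bne_iff_ne, ne_eq, Int.natCast_inj]
      omega
    rw [h1]
    congr 1
    funext x; simp only [Function.comp]; omega
  rw [hlo, hhi, List.nil_append, List.map_append]
  congr 1
  · -- map getD over range i = take i
    have h := map_getD_range_eq_drop (w.take i) 0 ' '
    simp only [Nat.sub_zero, List.drop_zero, List.length_take, Nat.zero_add] at h
    rw [min_eq_left (le_of_lt hi)] at h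
    rw [← h]
    apply List.map_congr_left
    intro a ha
    simp only [List.mem_range] at ha
    rw [List.getD_eq_getElem?_getD, List.getD_eq_getElem?_getD,
        List.getElem?_take_of_lt ha]
  · rw [List.map_map, ← map_getD_range_eq_drop w (i + 1) ' ']
    apply List.map_congr_left
    intro a _
    rfl

-- deleting at the junction of out ++ rest removes rest's head
theorem delete_at_junction (out rest : List Char) (h : rest ≠ []) :
    delete_char (out ++ rest) (out.length : Int) = out ++ rest.tail := by
  have hr : 0 < rest.length := List.length_pos_iff.2 h
  rw [delete_char_eq _ _ (by simp only [List.length_append]; omega)]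
  congr 1
  · exact List.take_left
  · rw [List.drop_append, List.drop_eq_nil_of_le (by omega), List.nil_append]
    have h1 : out.length + 1 - out.length = 1 := by omega
    rw [h1, List.drop_one]

-- getD on out ++ rest, at/after the junction and at the last kept position
theorem getD_append_right_ofs (out rest : List Char) (k : Nat) (d : Char) :
    (out ++ rest).getD (out.length + k) d = rest.getD k d := by
  rw [List.getD_eq_getElem?_getD, List.getD_eq_getElem?_getD,
      List.getElem?_append_right (Nat.le_add_right out.length k)]
  congr 2; omega

theorem getD_last_of_append (out rest : List Char) (h : out ≠ []) (d : Char) :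
    (out ++ rest).getD (out.length - 1) d = out.getLast h := by
  have h0 : 0 < out.length := List.length_pos_iff.2 h
  rw [List.getD_eq_getElem?_getD, List.getElem?_append_left (by omega),
      List.getElem?_eq_getElem (by omega)]
  simp [List.getLast_eq_getElem]

theorem drop_cons_getD (ct : List Char) (j : Nat) (hj : j < ct.length) :
    ct.drop j = ct.getD j ' ' :: ct.drop (j + 1) := by
  rw [List.drop_eq_getElem_cons hj, List.getD_eq_getElem?_getD,
      List.getElem?_eq_getElem hj]
  rfl

-- the main invariant: A's loop on (out ++ ct.drop j) at index out.length equals B's loop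
theorem pv_key (ct : List Char) : ∀ (fuel j : Nat) (out : List Char), ct.length - j ≤ fuel →
    pv_aLoop (out ++ ct.drop j) out.length = pv_bLoop ct out j := by
  intro fuel
  induction fuel with
  | zero =>
    intro j out hf
    rw [pv_aLoop, pv_bLoop, List.drop_eq_nil_of_le (by omega)]
    rw [dif_neg (by simp), dif_neg (by omega)]
    simp
  | succ n ih =>
    intro j out hf
    by_cases hj : j < ct.length
    · -- one iteration of each loop
      have hlen : (out ++ ct.drop j).length = out.length + (ct.length - j) := by
        simp [List.length_drop]
      rw [pv_aLoop, pv_bLoop, dif_pos (by omega), dif_pos hj]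
      unfold pv_aStep pv_aStepZ
      have hget0 : (out ++ ct.drop j).getD out.length ' ' = ct.getD j ' ' := by
        have h := getD_append_right_ofs out (ct.drop j) 0 ' '
        simp only [Nat.add_zero] at h
        rw [h, List.getD_eq_getElem?_getD, List.getD_eq_getElem?_getD,
            List.getElem?_drop, Nat.add_zero]
      have hget1 : (out ++ ct.drop j).getD (out.length + 1) ' ' = ct.getD (j + 1) ' ' := by
        rw [getD_append_right_ofs, List.getD_eq_getElem?_getD, List.getD_eq_getElem?_getD,
            List.getElem?_drop]
      by_cases hB : out ≠ [] ∧ j < ct.length - 1 ∧ ct.getD j ' ' = 'X' ∧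
          PySem.List.pyGetD out (-1) ' ' = ct.getD (j + 1) ' '
      · -- X-deletion fires in both programs
        obtain ⟨hne, hjlt, hX, hlast⟩ := hB
        have hgetm1 : (out ++ ct.drop j).getD (out.length - 1) ' ' = out.getLast hne :=
          getD_last_of_append out _ hne ' '
        have hA : out.length ≠ 0 ∧ out.length ≠ (out ++ ct.drop j).length - 1 ∧
            (out ++ ct.drop j).getD out.length ' ' = 'X' ∧
            (out ++ ct.drop j).getD (out.length - 1) ' ' =
              (out ++ ct.drop j).getD (out.length + 1) ' ' := by
          refine ⟨by simpa using hne, by omega, by rw [hget0]; exact hX, ?_⟩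
          rw [hgetm1, hget1, ← PySem.List.pyGetD_neg_one out ' ' hne, hlast]
        rw [if_pos hA]
        have hdel : delete_char (out ++ ct.drop j) (out.length : Int)
            = out ++ ct.drop (j + 1) := by
          rw [delete_at_junction out (ct.drop j) (by
                intro hnil
                have hc := congrArg List.length hnil
                simp only [List.length_drop, List.length_nil] at hc
                omega),
              List.tail_drop]
        rw [hdel]
        have hlen1 : (out ++ ct.drop (j + 1)).length
            = out.length + (ct.length - (j + 1)) := by
          simp [List.length_drop]
        have hget1' : (out ++ ct.drop (j + 1)).getD out.length ' ' = ct.getD (j + 1) ' ' := by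
          have h := getD_append_right_ofs out (ct.drop (j + 1)) 0 ' '
          simp only [Nat.add_zero] at h
          rw [h, List.getD_eq_getElem?_getD, List.getD_eq_getElem?_getD,
              List.getElem?_drop, Nat.add_zero]
        rw [if_pos (show out ≠ [] ∧ j < ct.length - 1 ∧ ct.getD j ' ' = 'X' ∧
              PySem.List.pyGetD out (-1) ' ' = ct.getD (j + 1) ' ' from ⟨hne, hjlt, hX, hlast⟩)]
        by_cases hZ : j + 1 = ct.length - 1 ∧ ct.getD (j + 1) ' ' = 'Z'
        · -- the shifted-in char is the trailing 'Z': both drop it and stop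
          rw [if_neg (show ¬¬ (j + 1 = ct.length - 1 ∧ ct.getD (j + 1) ' ' = 'Z') from
                not_not.2 hZ)]
          rw [if_pos (show out.length = (out ++ ct.drop (j + 1)).length - 1 ∧
                (out ++ ct.drop (j + 1)).getD out.length ' ' = 'Z' from
                ⟨by omega, by rw [hget1']; exact hZ.2⟩)]
          have hdel2 : delete_char (out ++ ct.drop (j + 1)) (out.length : Int)
              = out ++ ct.drop (j + 2) := by
            rw [delete_at_junction out (ct.drop (j + 1)) (by
                  intro hnil
                  have hc := congrArg List.length hnil
                  simp only [List.length_drop, List.length_nil] at hc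
                  omega),
                List.tail_drop]
          rw [hdel2, List.drop_eq_nil_of_le (by omega), List.append_nil]
          rw [pv_aLoop, dif_neg (by omega), pv_bLoop, dif_neg (by omega)]
        · rw [if_pos (show ¬ (j + 1 = ct.length - 1 ∧ ct.getD (j + 1) ' ' = 'Z') from hZ)]
          rw [if_neg (show ¬ (out.length = (out ++ ct.drop (j + 1)).length - 1 ∧
                (out ++ ct.drop (j + 1)).getD out.length ' ' = 'Z') from by
                intro hA2
                exact hZ ⟨by omega, by rw [← hget1']; exact hA2.2⟩)]
          have hsplit : out ++ ct.drop (j + 1)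
              = (out ++ [ct.getD (j + 1) ' ']) ++ ct.drop (j + 2) := by
            rw [drop_cons_getD ct (j + 1) (by omega)]
            simp
          rw [hsplit]
          have h := ih (j + 2) (out ++ [ct.getD (j + 1) ' ']) (by omega)
          simpa [List.length_append] using h
      · -- no X-deletion in either program
        have hA : ¬ (out.length ≠ 0 ∧ out.length ≠ (out ++ ct.drop j).length - 1 ∧
            (out ++ ct.drop j).getD out.length ' ' = 'X' ∧
            (out ++ ct.drop j).getD (out.length - 1) ' ' =
              (out ++ ct.drop j).getD (out.length + 1) ' ') := by
          intro hA
          apply hB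
          obtain ⟨h0, h1, h2, h3⟩ := hA
          have hne : out ≠ [] := by
            intro hnil; rw [hnil] at h0; simp at h0
          refine ⟨hne, by omega, by rw [← hget0]; exact h2, ?_⟩
          rw [PySem.List.pyGetD_neg_one out ' ' hne, ← hget1, ← h3,
              getD_last_of_append out _ hne ' ']
        rw [if_neg hA, if_neg hB]
        by_cases hZ : j = ct.length - 1 ∧ ct.getD j ' ' = 'Z'
        · rw [if_neg (show ¬¬ (j = ct.length - 1 ∧ ct.getD j ' ' = 'Z') from not_not.2 hZ)]
          rw [if_pos (show out.length = (out ++ ct.drop j).length - 1 ∧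
                (out ++ ct.drop j).getD out.length ' ' = 'Z' from
                ⟨by omega, by rw [hget0]; exact hZ.2⟩)]
          have hdel : delete_char (out ++ ct.drop j) (out.length : Int)
              = out ++ ct.drop (j + 1) := by
            rw [delete_at_junction out (ct.drop j) (by
                  intro hnil
                  have hc := congrArg List.length hnil
                  simp only [List.length_drop, List.length_nil] at hc
                  omega),
                List.tail_drop]
          rw [hdel, List.drop_eq_nil_of_le (by omega), List.append_nil]
          rw [pv_aLoop, dif_neg (by omega), pv_bLoop, dif_neg (by omega)]
        · rw [if_pos (show ¬ (j = ct.length - 1 ∧ ct.getD j ' ' = 'Z') from hZ)]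
          rw [if_neg (show ¬ (out.length = (out ++ ct.drop j).length - 1 ∧
                (out ++ ct.drop j).getD out.length ' ' = 'Z') from by
                intro hA2
                exact hZ ⟨by omega, by rw [← hget0]; exact hA2.2⟩)]
          have hsplit : out ++ ct.drop j = (out ++ [ct.getD j ' ']) ++ ct.drop (j + 1) := by
            rw [drop_cons_getD ct j hj]
            simp
          rw [hsplit]
          have h := ih (j + 1) (out ++ [ct.getD j ' ']) (by omega)
          simpa [List.length_append] using h
    · rw [pv_aLoop, pv_bLoop, List.drop_eq_nil_of_le (by omega)]
      rw [dif_neg (by simp), dif_neg (by omega)]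
      simp

-- ===== VERDICT (by name: the statement is the Claim_ definition above) =====
theorem prepare_text_decryption_spec : Claim_equal_prepare_text_decryption := by
  intro cipherText _
  unfold Spec_prepare_text_decryption prepare_text_decryption prepare_text_decryption_alt
  congr 1
  have h := pv_key cipherText.toList cipherText.toList.length 0 [] (by omega)
  simpa using h
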